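-- pv_equiv track=rewrite | github.com/MTimea101/BGDTSQL | BackEnd/Select/joinExecutor.py | select_join_columns
-- ===== SOURCE A (Python) =====
-- def get_column_value_from_row(row, column_name):
--     if column_name in row:
--         return row[column_name]
--
--     if "." not in column_name:
--         for key in row:
--             if key.endswith(f".{column_name}"):
--                 return row[key]
--
--     return None
--
-- def select_join_columns(row, selected_columns, tables, metadata_all):
--     result = []
--     for col in selected_columns:
--         if col == "*":
--             for table in tables:
--                 table_metadata = metadata_all[table]
--                 for table_col in table_metadata["columns"]:
--                     col_name = table_col["name"]
--                     value = get_column_value_from_row(row, f"{table}.{col_name}")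
--                     result.append(value if value is not None else "")
--         else:
--             value = get_column_value_from_row(row, col)
--             result.append(value if value is not None else "")
--     return result
-- ===== SOURCE B (Python) =====
-- def select_join_columns(row, selected_columns, tables, metadata_all):
--     # One pass over the row builds a hash index from bare column suffix (the part
--     # after the last '.') to the value of the FIRST row key with that suffix, so
--     # the per-column linear scan over the row disappears.
--     suffix_index = {}
--     for key, value in row.items():
--         _head, sep, tail = key.rpartition(".")
--         if sep:
--             suffix_index.setdefault(tail, value)
--
--     result = []
--     for col in selected_columns:
--         if col == "*":
--             for table in tables:
--                 for table_col in metadata_all[table]["columns"]: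
--                     # a qualified name always contains '.', so only the exact
--                     # lookup can ever match
--                     result.append(row.get(f"{table}.{table_col['name']}", ""))
--         else:
--             if col in row:
--                 result.append(row[col])
--             elif "." in col:
--                 result.append("")
--             else:
--                 result.append(suffix_index.get(col, ""))
--     return result
-- ===== Notes on version B (the rewrite author's own statement) =====
-- stated objective: faster
-- what changed: B builds a suffix-to-value hash index from the row once (setdefault keeps the first key per suffix, matching A's first-match scan) so A's per-column linear scan over the row disappears, and in the '*' branch looks qualified names up directly since they always contain '.'.
import Mathlib
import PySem

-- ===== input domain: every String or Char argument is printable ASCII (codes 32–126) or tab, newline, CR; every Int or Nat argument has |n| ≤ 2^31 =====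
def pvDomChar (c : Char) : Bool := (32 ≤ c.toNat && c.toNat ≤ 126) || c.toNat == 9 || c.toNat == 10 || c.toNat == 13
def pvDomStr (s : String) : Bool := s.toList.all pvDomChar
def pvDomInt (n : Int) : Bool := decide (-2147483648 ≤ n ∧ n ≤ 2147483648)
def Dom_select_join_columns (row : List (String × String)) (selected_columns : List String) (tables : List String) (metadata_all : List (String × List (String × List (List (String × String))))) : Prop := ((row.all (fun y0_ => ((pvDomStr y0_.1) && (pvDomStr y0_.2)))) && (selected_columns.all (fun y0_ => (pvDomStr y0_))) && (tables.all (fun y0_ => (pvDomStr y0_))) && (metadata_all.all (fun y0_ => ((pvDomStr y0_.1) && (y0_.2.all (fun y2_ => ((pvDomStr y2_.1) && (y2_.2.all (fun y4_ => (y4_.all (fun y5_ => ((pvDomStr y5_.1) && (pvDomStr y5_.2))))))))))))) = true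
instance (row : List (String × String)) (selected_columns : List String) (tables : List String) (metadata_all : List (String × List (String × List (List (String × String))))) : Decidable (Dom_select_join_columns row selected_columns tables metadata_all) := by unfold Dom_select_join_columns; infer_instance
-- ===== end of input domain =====

-- B replaces A's per-column linear suffix scan over the row by a suffix→value hash index
-- built once from the row (first key per suffix wins, like A's scan), and in the '*' branch
-- looks the qualified name up directly since it always contains '.'.

-- ===== PORT A =====
-- module helper get_column_value_from_row: suffix scan = first key of row ending in "." ++ name
-- (row is a Python dict, so keys are distinct and row[key] is this entry's value)
def suffixScan (row : List (String × String)) (name : String) : Option String :=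
  match row with
  | [] => none
  | (k, v) :: rest => if PySem.Str.endswith k ("." ++ name) then some v else suffixScan rest name

def getColumnValueFromRow (row : List (String × String)) (column_name : String) : Option String :=
  match (PySem.Dict.mk row).get? column_name with
  | some v => some v
  | none =>
    if PySem.Str.isIn "." column_name then none
    else suffixScan row column_name

def select_join_columns (row : List (String × String)) (selected_columns : List String) (tables : List String) (metadata_all : List (String × List (String × List (List (String × String))))) : List String :=
  selected_columns.foldl (fun result col =>
    if col == "*" then
      tables.foldl (fun result table =>
        match (PySem.Dict.mk metadata_all).get? table with
        | none => result  -- Python raises KeyError here; excluded by Pre_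
        | some table_metadata =>
          match (PySem.Dict.mk table_metadata).get? "columns" with
          | none => result  -- KeyError; excluded by Pre_
          | some cols =>
            cols.foldl (fun result table_col =>
              match (PySem.Dict.mk table_col).get? "name" with
              | none => result  -- KeyError; excluded by Pre_
              | some col_name =>
                result ++ [(getColumnValueFromRow row (table ++ "." ++ col_name)).getD ""]) result) result
    else
      result ++ [(getColumnValueFromRow row col).getD ""]) []


-- ===== PORT B =====
-- hand port of key.rpartition(".") as used in Source B (PySem has no rpartition): the separator is
-- nonempty iff '.' ∈ key, and the tail is exactly the characters after the LAST '.'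
def tailAfterDot? (k : String) : Option String :=
  if '.' ∈ k.toList then
    some (String.ofList (k.toList.reverse.takeWhile (fun c => c != '.')).reverse)
  else none

-- Source B's first loop: suffix → value of the FIRST row key with that suffix (setdefault)
def idxStep (idx : PySem.Dict String String) (kv : String × String) : PySem.Dict String String :=
  match tailAfterDot? kv.1 with
  | none => idx
  | some tail => idx.setdefault tail kv.2

def buildSuffixIndex (row : List (String × String)) : PySem.Dict String String :=
  row.foldl idxStep (PySem.Dict.mk [])

def select_join_columns_alt (row : List (String × String)) (selected_columns : List String) (tables : List String) (metadata_all : List (String × List (String × List (List (String × String))))) : List String :=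
  let suffix_index := buildSuffixIndex row
  selected_columns.foldl (fun result col =>
    if col == "*" then
      tables.foldl (fun result table =>
        match (PySem.Dict.mk metadata_all).get? table with
        | none => result  -- KeyError in Source B; excluded by Pre_
        | some table_metadata =>
          match (PySem.Dict.mk table_metadata).get? "columns" with
          | none => result  -- KeyError; excluded by Pre_
          | some cols =>
            cols.foldl (fun result table_col =>
              match (PySem.Dict.mk table_col).get? "name" with
              | none => result  -- KeyError; excluded by Pre_
              | some col_name =>
                result ++ [((PySem.Dict.mk row).get? (table ++ "." ++ col_name)).getD ""]) result) result
    else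
      result ++ [match (PySem.Dict.mk row).get? col with
                 | some v => v
                 | none =>
                   if PySem.Str.isIn "." col then ""
                   else (suffix_index.get? col).getD ""]) []


-- ===== PRECONDITION & SPEC =====
-- Pre_: A (and B) raise KeyError when "*" is selected and some table is missing from
-- metadata_all, lacks a "columns" entry, or some column dict lacks "name"; excluded.
def Pre_select_join_columns (row : List (String × String)) (selected_columns : List String) (tables : List String) (metadata_all : List (String × List (String × List (List (String × String))))) : Prop :=
  "*" ∈ selected_columns →
    (tables.all (fun table =>
      match ((PySem.Dict.mk metadata_all).get? table).bind (fun tm => (PySem.Dict.mk tm).get? "columns") with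
      | none => false
      | some cols => cols.all (fun c => ((PySem.Dict.mk c).get? "name").isSome))) = true
instance (row : List (String × String)) (selected_columns : List String) (tables : List String) (metadata_all : List (String × List (String × List (List (String × String))))) : Decidable (Pre_select_join_columns row selected_columns tables metadata_all) := by unfold Pre_select_join_columns; infer_instance

def pvWitness_select_join_columns : (List (String × String)) × List String × List String × (List (String × List (String × List (List (String × String))))) :=
  ([("t.a", "1"), ("b", "2")], ["*", "b"], ["t"], [("t", [("columns", [[("name", "a")]])])])

def Spec_select_join_columns (row : List (String × String)) (selected_columns : List String) (tables : List String) (metadata_all : List (String × List (String × List (List (String × String))))) (out : List String) : Prop := out = select_join_columns_alt row selected_columns tables metadata_all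
instance (row : List (String × String)) (selected_columns : List String) (tables : List String) (metadata_all : List (String × List (String × List (List (String × String))))) (out : List String) : Decidable (Spec_select_join_columns row selected_columns tables metadata_all out) := by unfold Spec_select_join_columns; infer_instance

-- ===== CLAIM (what is proved, stated in full; the proofs are below) =====
def Claim_equal_select_join_columns : Prop := ∀ (row : List (String × String)) (selected_columns : List String) (tables : List String) (metadata_all : List (String × List (String × List (List (String × String))))), Dom_select_join_columns row selected_columns tables metadata_all → Pre_select_join_columns row selected_columns tables metadata_all → Spec_select_join_columns row selected_columns tables metadata_all (select_join_columns row selected_columns tables metadata_all)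

-- ===== LEMMAS AND PROOFS =====

-- a dot-free name matches key 'nn ++ [.]' as a reversed prefix iff takeWhile stops exactly at that dot
theorem prefix_iff_takeWhile (nn rr : List Char) (hn : '.' ∉ nn) :
    nn ++ ['.'] <+: rr ↔ ('.' ∈ rr ∧ rr.takeWhile (fun c => c != '.') = nn) := by
  constructor
  · rintro ⟨t, rfl⟩
    constructor
    · simp
    · induction nn with
      | nil => simp
      | cons a nn ih =>
        have ha : a ≠ '.' := fun h => hn (by simp [h])
        simp only [List.cons_append, List.takeWhile_cons]
        simp only [bne_iff_ne, ne_eq, ha, not_false_eq_true, if_true]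
        have := ih (fun h => hn (List.mem_cons_of_mem _ h))
        simpa using this
  · rintro ⟨hmem, htw⟩
    have hsplit := List.takeWhile_append_dropWhile (p := fun c => c != '.') (l := rr)
    cases hd : rr.dropWhile (fun c => c != '.') with
    | nil =>
      exfalso
      have : rr = nn := by rw [← hsplit, hd, htw, List.append_nil]
      exact hn (this ▸ hmem)
    | cons c t =>
      have hc : (fun c => c != '.') c = false := by
        have := List.head_dropWhile_not (p := fun c => c != '.') (l := rr) (by rw [hd]; simp)
        simpa [hd] using this
      have hc' : c = '.' := by simpa using hc
      exact ⟨t, by rw [← hsplit, hd, htw, hc']; simp⟩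

-- A's endswith test, for a dot-free name, is exactly B's rpartition tail test
theorem endswith_iff_tail (k n : String) (hn : '.' ∉ n.toList) :
    PySem.Str.endswith k ("." ++ n) = true ↔ tailAfterDot? k = some n := by
  have hdot : (("." : String) ++ n).toList = '.' :: n.toList := by
    rw [String.toList_append]; rfl
  rw [PySem.Str.endswith_eq, hdot, PySem.Chars.endswith_iff]
  have hrev : ('.' :: n.toList) <:+ k.toList ↔ n.toList.reverse ++ ['.'] <+: k.toList.reverse := by
    rw [← List.reverse_prefix]; simp
  rw [hrev, prefix_iff_takeWhile _ _ (by simpa using hn)]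
  unfold tailAfterDot?
  constructor
  · rintro ⟨hmem, htw⟩
    rw [if_pos (by simpa using hmem)]
    have : (k.toList.reverse.takeWhile (fun c => c != '.')).reverse = n.toList := by
      rw [htw]; simp
    rw [this, String.ofList_toList]
  · intro h
    split_ifs at h with hmem
    · have := Option.some.inj h
      constructor
      · simpa using hmem
      · have : (k.toList.reverse.takeWhile (fun c => c != '.')).reverse = n.toList := by
          rw [← this, String.toList_ofList]
        simpa [List.reverse_eq_iff] using this

-- the suffix index built by B returns exactly what A's first-match suffix scan returns
theorem idx_fold (name : String) (hn : '.' ∉ name.toList) :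
    ∀ (row : List (String × String)) (acc : PySem.Dict String String),
      ((row.foldl idxStep acc).get? name) = ((acc.get? name).or (suffixScan row name)) := by
  intro row
  induction row with
  | nil => intro acc; simp [suffixScan]
  | cons kv rest ih =>
    intro acc
    obtain ⟨k, v⟩ := kv
    by_cases he : PySem.Str.endswith k ("." ++ name) = true
    · have ht : tailAfterDot? k = some name := (endswith_iff_tail k name hn).mp he
      rw [List.foldl_cons]
      show ((rest.foldl idxStep (idxStep acc (k, v))).get? name) = _
      rw [ih]
      unfold idxStep
      rw [ht]
      simp only
      rw [PySem.Dict.get?_setdefault_self]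
      simp only [suffixScan]
      rw [if_pos he]
      cases acc.get? name <;> simp
    · rw [List.foldl_cons]
      show ((rest.foldl idxStep (idxStep acc (k, v))).get? name) = _
      rw [ih]
      unfold idxStep
      cases ht : tailAfterDot? k with
      | none => simp only [suffixScan]; rw [if_neg he]
      | some t =>
        have hne : name ≠ t := by
          intro h; exact he ((endswith_iff_tail k name hn).mpr (by rw [ht, h]))
        simp only
        rw [PySem.Dict.get?_setdefault_of_ne _ _ hne]
        simp only [suffixScan]
        rw [if_neg he]

theorem idx_get (row : List (String × String)) (name : String) (hn : '.' ∉ name.toList) :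
    (buildSuffixIndex row).get? name = suffixScan row name := by
  unfold buildSuffixIndex
  rw [idx_fold name hn row (PySem.Dict.mk [])]
  have : (PySem.Dict.mk ([] : List (String × String))).get? name = none := rfl
  rw [this, Option.none_or]

-- a qualified name "table.col" always contains '.', so A's lookup is the plain dict lookup
theorem star_item (row : List (String × String)) (table nm : String) :
    (getColumnValueFromRow row (table ++ "." ++ nm)).getD "" = ((PySem.Dict.mk row).get? (table ++ "." ++ nm)).getD "" := by
  unfold getColumnValueFromRow
  cases h : (PySem.Dict.mk row).get? (table ++ "." ++ nm) with
  | some v => simp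
  | none =>
    have hin : PySem.Chars.isIn ['.'] (table.toList ++ '.' :: nm.toList) = true :=
      (PySem.Chars.isIn_iff_infix _ _).mpr ⟨table.toList, nm.toList, by simp⟩
    simp [hin]

-- the non-'*' branch: A's helper equals B's inline exact/suffix-index lookup
theorem plain_item (row : List (String × String)) (col : String) :
    (getColumnValueFromRow row col).getD "" =
      (match (PySem.Dict.mk row).get? col with
       | some v => v
       | none =>
         if PySem.Str.isIn "." col then ""
         else ((buildSuffixIndex row).get? col).getD "") := by
  unfold getColumnValueFromRow
  cases h : (PySem.Dict.mk row).get? col with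
  | some v => simp
  | none =>
    by_cases hin : PySem.Chars.isIn ['.'] col.toList = true
    · simp [hin]
    · have hn : '.' ∉ col.toList := by
        intro hm
        apply hin
        apply (PySem.Chars.isIn_iff_infix _ _).mpr
        obtain ⟨s, t, hst⟩ := List.append_of_mem hm
        exact ⟨s, t, by rw [hst]; simp⟩
      rw [idx_get row col hn]
      simp [hin]

-- ===== VERDICT (by name: the statement is the Claim_ definition above) =====
theorem select_join_columns_spec : Claim_equal_select_join_columns := by
  intro row sc tables metadata_all _hdom _hpre
  unfold Spec_select_join_columns select_join_columns select_join_columns_alt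
  simp only
  congr 1
  funext result col
  by_cases hc : col = "*"
  · subst hc
    rw [if_pos (by decide), if_pos (by decide)]
    simp only [star_item]
  · rw [if_neg (by simpa using hc), if_neg (by simpa using hc)]
    rw [plain_item]
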